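-- pv_equiv track=rewrite | github.com/MichaelAyles/search-bench | src/analysis/report.py | _summarize_reviews
-- ===== SOURCE A (Python) =====
-- from collections import defaultdict
--
-- def _summarize_reviews(results: list[dict]) -> str:
--     # Verdict distribution per reviewer
--     groups = defaultdict(lambda: defaultdict(int))
--     for r in results:
--         key = f"{r.get('reviewer_tool', '?')}/{r.get('reviewer_mode', '?')}"
--         verdict = r.get("verdict", "UNKNOWN")
--         groups[key][verdict] += 1
--
--     lines = ["### Review Verdicts", ""]
--     lines.append("| Reviewer | APPROVE | REQUEST_CHANGES | REJECT | UNKNOWN |")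
--     lines.append("|---|---|---|---|---|")
--
--     for key in sorted(groups):
--         d = groups[key]
--         lines.append(
--             f"| {key} | {d.get('APPROVE',0)} | {d.get('REQUEST_CHANGES',0)} "
--             f"| {d.get('REJECT',0)} | {d.get('UNKNOWN',0)} |"
--         )
--
--     return "\n".join(lines) + "\n"
-- ===== SOURCE B (Python) =====
-- def _summarize_reviews(results: list[dict]) -> str:
--     # Sort-then-scan: sort (key, verdict) pairs by key, then emit one row per
--     # contiguous run, counting verdicts with a plain dict.
--     pairs = sorted(
--         ((f"{r.get('reviewer_tool', '?')}/{r.get('reviewer_mode', '?')}",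
--           r.get("verdict", "UNKNOWN")) for r in results),
--         key=lambda p: p[0],
--     )
--     lines = ["### Review Verdicts", ""]
--     lines.append("| Reviewer | APPROVE | REQUEST_CHANGES | REJECT | UNKNOWN |")
--     lines.append("|---|---|---|---|---|")
--     i, n = 0, len(pairs)
--     while i < n:
--         key = pairs[i][0]
--         c = {}
--         while i < n and pairs[i][0] == key:
--             v = pairs[i][1]
--             c[v] = c.get(v, 0) + 1
--             i += 1
--         lines.append(
--             f"| {key} | {c.get('APPROVE',0)} | {c.get('REQUEST_CHANGES',0)} "
--             f"| {c.get('REJECT',0)} | {c.get('UNKNOWN',0)} |"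
--         )
--     return "\n".join(lines) + "\n"
-- ===== Notes on version B (the rewrite author's own statement) =====
-- stated objective: alternative
-- what changed: Replaces A's defaultdict-of-defaultdicts grouping followed by a sort of the keys with a sort of the (key, verdict) pairs followed by a single scan that emits one markdown row per contiguous run, counting verdicts in a plain dict per run.
import Mathlib
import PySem

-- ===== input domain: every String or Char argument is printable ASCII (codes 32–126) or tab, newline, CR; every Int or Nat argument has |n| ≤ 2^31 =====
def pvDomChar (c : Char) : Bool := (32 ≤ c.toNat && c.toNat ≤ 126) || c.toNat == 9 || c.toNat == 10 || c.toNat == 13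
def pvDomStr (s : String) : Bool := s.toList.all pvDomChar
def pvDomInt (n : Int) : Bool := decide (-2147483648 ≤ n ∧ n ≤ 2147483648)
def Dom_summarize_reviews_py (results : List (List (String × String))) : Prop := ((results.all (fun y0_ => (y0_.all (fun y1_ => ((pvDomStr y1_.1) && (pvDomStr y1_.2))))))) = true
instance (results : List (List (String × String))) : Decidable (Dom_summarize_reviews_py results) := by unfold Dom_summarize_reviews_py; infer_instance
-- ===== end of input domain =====

-- B replaces A's dict-of-dicts grouping by sorting the (key, verdict) pairs by key and
-- emitting one row per contiguous run in a single scan (objective: alternative algorithm).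

-- ===== PORT A =====
def summarize_reviews_py (results : List (List (String × String))) : String :=
  let groups : PySem.Dict String (PySem.Dict String Int) :=
    results.foldl (fun g r =>
      let key := (PySem.Dict.mk r).getD "reviewer_tool" "?" ++ "/" ++ (PySem.Dict.mk r).getD "reviewer_mode" "?"
      let verdict := (PySem.Dict.mk r).getD "verdict" "UNKNOWN"
      g.modify key PySem.Dict.empty (fun d => d.modify verdict 0 (· + 1))) PySem.Dict.empty
  let lines : List String :=
    ["### Review Verdicts", "",
     "| Reviewer | APPROVE | REQUEST_CHANGES | REJECT | UNKNOWN |",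
     "|---|---|---|---|---|"]
  let lines := lines ++ (PySem.List.sorted groups.keys (fun k => k) false).map (fun key =>
    let d := groups.getD key PySem.Dict.empty
    "| " ++ key ++ " | " ++ PySem.Int.toStr (d.getD "APPROVE" 0) ++ " | " ++
      PySem.Int.toStr (d.getD "REQUEST_CHANGES" 0) ++ " | " ++ PySem.Int.toStr (d.getD "REJECT" 0) ++
      " | " ++ PySem.Int.toStr (d.getD "UNKNOWN" 0) ++ " |")
  PySem.Str.join "\n" lines ++ "\n"

-- ===== PORT B =====
-- B-side helper: the (key, verdict) pair of one result dict
def pvPairB (r : List (String × String)) : String × String :=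
  ((PySem.Dict.mk r).getD "reviewer_tool" "?" ++ "/" ++ (PySem.Dict.mk r).getD "reviewer_mode" "?",
   (PySem.Dict.mk r).getD "verdict" "UNKNOWN")

-- B-side helper: the scan over the key-sorted pair list (the two while-loops of Source B:
-- the inner while is the takeWhile/dropWhile run split, the outer while the recursion)
def pvScanB : List (String × String) → List String
  | [] => []
  | (key, v) :: rest =>
    let grp := rest.takeWhile (fun p => p.1 == key)
    let rest' := rest.dropWhile (fun p => p.1 == key)
    let c : PySem.Dict String Int :=
      ((key, v) :: grp).foldl (fun d p => d.insert p.2 (d.getD p.2 0 + 1)) PySem.Dict.empty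
    ("| " ++ key ++ " | " ++ PySem.Int.toStr (c.getD "APPROVE" 0) ++ " | " ++
      PySem.Int.toStr (c.getD "REQUEST_CHANGES" 0) ++ " | " ++ PySem.Int.toStr (c.getD "REJECT" 0) ++
      " | " ++ PySem.Int.toStr (c.getD "UNKNOWN" 0) ++ " |") :: pvScanB rest'
  termination_by L => L.length
  decreasing_by
    simp only [List.length_cons]
    exact Nat.lt_succ_of_le (List.length_dropWhile_le _ _)

def summarize_reviews_py_alt (results : List (List (String × String))) : String :=
  let pairs := PySem.List.sorted (results.map pvPairB) (fun p => p.1) false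
  let lines : List String :=
    ["### Review Verdicts", "",
     "| Reviewer | APPROVE | REQUEST_CHANGES | REJECT | UNKNOWN |",
     "|---|---|---|---|---|"]
  let lines := lines ++ pvScanB pairs
  PySem.Str.join "\n" lines ++ "\n"

-- ===== PRECONDITION & SPEC =====
def Spec_summarize_reviews_py (results : List (List (String × String))) (out : String) : Prop := out = summarize_reviews_py_alt results
instance (results : List (List (String × String))) (out : String) : Decidable (Spec_summarize_reviews_py results out) := by unfold Spec_summarize_reviews_py; infer_instance

-- ===== CLAIM (what is proved, stated in full; the proofs are below) =====
def Claim_equal_summarize_reviews_py : Prop := ∀ (results : List (List (String × String))), Dom_summarize_reviews_py results → Spec_summarize_reviews_py results (summarize_reviews_py results)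

-- ===== LEMMAS AND PROOFS =====

-- the markdown row for key k and the four displayed counts
def pvRow (k : String) (a rc rej u : Int) : String :=
  "| " ++ k ++ " | " ++ PySem.Int.toStr a ++ " | " ++ PySem.Int.toStr rc ++ " | " ++
    PySem.Int.toStr rej ++ " | " ++ PySem.Int.toStr u ++ " |"

-- the canonical row list both programs compute, phrased over the pair list P
def pvRows (ks : List String) (P : List (String × String)) : List String :=
  ks.map (fun k => pvRow k (P.count (k, "APPROVE")) (P.count (k, "REQUEST_CHANGES"))
    (P.count (k, "REJECT")) (P.count (k, "UNKNOWN")))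

-- A's inner fold step, over pairs
def pvStepA (g : PySem.Dict String (PySem.Dict String Int)) (p : String × String) :
    PySem.Dict String (PySem.Dict String Int) :=
  g.modify p.1 PySem.Dict.empty (fun d => d.modify p.2 0 (· + 1))

lemma pvCountA (L : List (String × String)) :
    ∀ (g : PySem.Dict String (PySem.Dict String Int)) (k w : String),
    (((L.foldl pvStepA g).getD k PySem.Dict.empty).getD w 0)
      = ((g.getD k PySem.Dict.empty).getD w 0) + L.count (k, w) := by
  induction L with
  | nil => intro g k w; simp
  | cons p t ih =>
    intro g k w
    simp only [List.foldl_cons, ih, pvStepA, List.count_cons]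
    rw [PySem.Dict.getD_modify]
    by_cases hk : k = p.1
    · subst hk
      rw [if_pos rfl, PySem.Dict.getD_modify]
      by_cases hw : w = p.2
      · subst hw
        rw [if_pos rfl]
        have hb : (p == (p.1, p.2)) = true := by simp
        rw [hb]
        simp only [if_true]
        push_cast
        ring
      · rw [if_neg hw]
        have hb : (p == (p.1, w)) = false := by
          simp only [Prod.ext_iff, beq_eq_false_iff_ne, ne_eq]
          intro h; exact hw h.2.symm
        simp [hb]
    · rw [if_neg hk]
      have hb : (p == (k, w)) = false := by
        simp only [Prod.ext_iff, beq_eq_false_iff_ne, ne_eq]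
        intro h; exact hk h.1.symm
      simp [hb]

lemma pvCountSnd (l : List (String × String)) (k w : String) (h : ∀ p ∈ l, p.1 = k) :
    (l.map (·.2)).count w = l.count (k, w) := by
  induction l with
  | nil => simp
  | cons p t ih =>
    have hp := h p (by simp)
    simp only [List.map_cons, List.count_cons, ih (fun q hq => h q (List.mem_cons_of_mem _ hq))]
    congr 1
    simp [beq_iff_eq, Prod.ext_iff, hp]

lemma pvCountZero (l : List (String × String)) (k w : String) (h : ∀ p ∈ l, p.1 ≠ k) :
    l.count (k, w) = 0 := by
  rw [List.count_eq_zero]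
  intro hm; exact h _ hm rfl

lemma pvCountB (l : List (String × String)) :
    ∀ (d : PySem.Dict String Int) (w : String),
    (l.foldl (fun d p => d.insert p.2 (d.getD p.2 0 + 1)) d).getD w 0
      = d.getD w 0 + ((l.map (·.2)).count w : Int) := by
  induction l with
  | nil => intro d w; simp
  | cons p t ih =>
    intro d w
    simp only [List.foldl_cons, ih, List.map_cons, List.count_cons]
    rw [PySem.Dict.getD_insert]
    by_cases hw : w = p.2
    · subst hw
      rw [if_pos rfl]
      have hb : (p.2 == p.2) = true := by simp
      rw [hb]
      simp only [if_true]
      push_cast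
      ring
    · rw [if_neg hw]
      have hb : (p.2 == w) = false := by
        simp only [beq_eq_false_iff_ne, ne_eq]
        exact fun h => hw h.symm
      simp [hb]

lemma pvRestLt (key : String) (rest : List (String × String))
    (hle : ∀ p ∈ rest, key ≤ p.1)
    (hp : rest.Pairwise (fun p q => p.1 ≤ q.1)) :
    ∀ p ∈ rest.dropWhile (fun p => p.1 == key), key < p.1 := by
  induction rest with
  | nil => simp
  | cons q t ih =>
    rw [List.pairwise_cons] at hp
    rw [List.dropWhile_cons]
    by_cases hq : (q.1 == key) = true
    · rw [if_pos hq]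
      exact ih (fun p hp' => hle p (List.mem_cons_of_mem _ hp')) hp.2
    · rw [if_neg hq]
      have hqk : key < q.1 := by
        rcases lt_or_eq_of_le (hle q (by simp)) with h | h
        · exact h
        · exact absurd (beq_iff_eq.mpr h.symm) hq
      intro p hpm
      rcases List.mem_cons.mp hpm with h | h
      · exact h ▸ hqk
      · exact lt_of_lt_of_le hqk (hp.1 p h)

-- B's scan on a key-sorted pair list produces exactly the canonical rows
lemma pvScanSpec (S : List (String × String)) (hp : S.Pairwise (fun p q => p.1 ≤ q.1)) :
    pvScanB S = pvRows (PySem.List.sorted (PySem.Set.ofList (S.map (·.1))) (fun k => k) false) S := by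
  induction S using pvScanB.induct with
  | case1 => simp [pvScanB, pvRows, PySem.List.sorted]
  | case2 key v rest rest'h ih =>
    rw [List.pairwise_cons] at hp
    rw [show rest'h = List.dropWhile (fun p => p.1 == key) rest from rfl] at ih
    have hgrp : ∀ p ∈ rest.takeWhile (fun p => p.1 == key), p.1 = key := by
      intro p hpm
      exact beq_iff_eq.mp (List.mem_takeWhile_imp (p := fun q : String × String => q.1 == key) hpm)
    have hrest' : ∀ p ∈ rest.dropWhile (fun p => p.1 == key), key < p.1 :=
      pvRestLt key rest (fun q hq => hp.1 q hq) hp.2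
    have hsplit : rest = rest.takeWhile (fun p => p.1 == key) ++ rest.dropWhile (fun p => p.1 == key) :=
      (List.takeWhile_append_dropWhile).symm
    have hpair' : (rest.dropWhile (fun p => p.1 == key)).Pairwise (fun p q => p.1 ≤ q.1) :=
      hp.2.sublist (List.dropWhile_sublist _)
    -- the sorted key set splits as key :: (sorted key set of the remainder)
    have hkeys : PySem.List.sorted (PySem.Set.ofList (((key, v) :: rest).map (·.1))) (fun k => k) false
        = key :: PySem.List.sorted (PySem.Set.ofList ((rest.dropWhile (fun p => p.1 == key)).map (·.1))) (fun k => k) false := by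
      apply PySem.List.sorted_eq_of_perm_of_pairwise_lt
      · rw [List.perm_ext_iff_of_nodup]
        · intro x
          simp only [List.mem_cons, PySem.List.mem_sorted, PySem.Set.mem_ofList, List.mem_map]
          constructor
          · rintro (h | ⟨p, hpm, hpx⟩)
            · exact ⟨(key, v), Or.inl rfl, h.symm⟩
            · exact ⟨p, Or.inr ((List.dropWhile_sublist _).subset hpm), hpx⟩
          · rintro ⟨p, hpm | hpm, hpx⟩
            · left; rw [← hpx, hpm]
            · rw [hsplit] at hpm
              rcases List.mem_append.mp hpm with h' | h'
              · left; rw [← hpx, hgrp p h']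
              · right; exact ⟨p, h', hpx⟩
        · rw [List.nodup_cons]
          refine ⟨?_, ((PySem.List.sorted_perm _ _ _).nodup_iff).mpr (PySem.Set.nodup_ofList _)⟩
          intro hmem
          rw [PySem.List.mem_sorted, PySem.Set.mem_ofList, List.mem_map] at hmem
          obtain ⟨p, hpm, hpx⟩ := hmem
          exact absurd (hpx ▸ hrest' p hpm) (lt_irrefl key)
        · exact PySem.Set.nodup_ofList _
      · rw [List.pairwise_cons]
        refine ⟨?_, PySem.List.sorted_ofList_pairwise_lt _⟩
        intro y hy
        rw [PySem.List.mem_sorted, PySem.Set.mem_ofList, List.mem_map] at hy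
        obtain ⟨p, hpm, hpx⟩ := hy
        exact hpx ▸ hrest' p hpm
    -- the per-run counter counts pairs of the whole list
    have hc : ∀ w, (((key, v) :: rest.takeWhile (fun p => p.1 == key)).foldl
          (fun d p => d.insert p.2 (d.getD p.2 0 + 1)) PySem.Dict.empty).getD w 0
        = (((key, v) :: rest).count (key, w) : Int) := by
      intro w
      rw [pvCountB]
      rw [pvCountSnd _ key w ?hall]
      case hall =>
        intro p hpm
        rcases List.mem_cons.mp hpm with h | h
        · rw [h]
        · exact hgrp p h
      conv_rhs => rw [hsplit]
      rw [← List.cons_append, List.count_append,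
          pvCountZero _ key w (fun p hpm => ne_of_gt (hrest' p hpm))]
      simp
    simp only [pvScanB]
    rw [hkeys, pvRows, List.map_cons, ← pvRows]
    congr 1
    · rw [hc "APPROVE", hc "REQUEST_CHANGES", hc "REJECT", hc "UNKNOWN"]
      rfl
    · rw [ih hpair', pvRows, pvRows]
      apply List.map_congr_left
      intro k hk
      rw [PySem.List.mem_sorted, PySem.Set.mem_ofList, List.mem_map] at hk
      obtain ⟨p, hpm, hpk⟩ := hk
      have hkk : key ≠ k := ne_of_lt (hpk ▸ hrest' p hpm)
      have hcnt : ∀ w, (((key, v) :: rest).count (k, w)) = (rest.dropWhile (fun p => p.1 == key)).count (k, w) := by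
        intro w
        conv_lhs => rw [hsplit]
        rw [← List.cons_append, List.count_append,
            pvCountZero ((key, v) :: rest.takeWhile (fun p => p.1 == key)) k w ?_, Nat.zero_add]
        intro q hq
        rcases List.mem_cons.mp hq with h | h
        · rw [h]; exact fun h' => hkk h'
        · rw [hgrp q h]; exact fun h' => hkk h'
      rw [hcnt, hcnt, hcnt, hcnt]

-- A computes the canonical rows over the unsorted pair list
lemma pvASpec (results : List (List (String × String))) :
    summarize_reviews_py results =
      PySem.Str.join "\n"
        (["### Review Verdicts", "",
          "| Reviewer | APPROVE | REQUEST_CHANGES | REJECT | UNKNOWN |",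
          "|---|---|---|---|---|"] ++
         pvRows (PySem.List.sorted (PySem.Set.ofList ((results.map pvPairB).map (·.1))) (fun k => k) false)
           (results.map pvPairB)) ++ "\n" := by
  simp only [summarize_reviews_py]
  have hfold : results.foldl (fun g r =>
      g.modify ((PySem.Dict.mk r).getD "reviewer_tool" "?" ++ "/" ++ (PySem.Dict.mk r).getD "reviewer_mode" "?")
        PySem.Dict.empty (fun d => d.modify ((PySem.Dict.mk r).getD "verdict" "UNKNOWN") 0 (· + 1)))
      PySem.Dict.empty
      = (results.map pvPairB).foldl pvStepA PySem.Dict.empty := by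
    rw [List.foldl_map]
    rfl
  rw [hfold]
  have hkeys : ((results.map pvPairB).foldl pvStepA PySem.Dict.empty).keys
      = PySem.Set.ofList ((results.map pvPairB).map (·.1)) := by
    exact PySem.Dict.keys_foldl_modify_key (results.map pvPairB) (fun p => p.1)
      PySem.Dict.empty (fun _ p => fun d => d.modify p.2 0 (· + 1)) PySem.Dict.empty
  rw [hkeys]
  congr 1
  congr 1
  congr 1
  rw [pvRows]
  apply List.map_congr_left
  intro k _
  rw [pvCountA, pvCountA, pvCountA, pvCountA]
  simp [pvRow]

-- ===== VERDICT (by name: the statement is the Claim_ definition above) =====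
theorem summarize_reviews_py_spec : Claim_equal_summarize_reviews_py := by
  intro results _
  unfold Spec_summarize_reviews_py
  rw [pvASpec]
  simp only [summarize_reviews_py_alt]
  rw [pvScanSpec (PySem.List.sorted (results.map pvPairB) (fun p => p.1) false)
       (PySem.List.sorted_pairwise _ _)]
  have hperm := PySem.List.sorted_perm (results.map pvPairB) (fun p => p.1) false
  have hK : PySem.List.sorted (PySem.Set.ofList ((results.map pvPairB).map (·.1))) (fun k => k) false
      = PySem.List.sorted (PySem.Set.ofList ((PySem.List.sorted (results.map pvPairB) (fun p => p.1) false).map (·.1))) (fun k => k) false := by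
    apply PySem.List.sorted_eq_sorted_of_perm _ _ _ (fun a b h => h)
    rw [List.perm_ext_iff_of_nodup (PySem.Set.nodup_ofList _) (PySem.Set.nodup_ofList _)]
    intro x
    simp only [PySem.Set.mem_ofList]
    rw [List.mem_map, List.mem_map]
    exact ⟨fun ⟨p, hpm, hpx⟩ => ⟨p, hperm.mem_iff.mpr hpm, hpx⟩,
           fun ⟨p, hpm, hpx⟩ => ⟨p, hperm.mem_iff.mp hpm, hpx⟩⟩
  rw [hK]
  congr 1
  congr 1
  congr 1
  rw [pvRows]
  apply List.map_congr_left
  intro k _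
  rw [hperm.count_eq, hperm.count_eq, hperm.count_eq, hperm.count_eq]
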